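-- pv_equiv track=rewrite | github.com/onehungsolow303-png/asset-manager | asset_manager/cli/curate_lora_dataset.py | round_robin_select
-- ===== SOURCE A (Python) =====
-- from collections import defaultdict
--
-- def round_robin_select(
--     assets: list[dict],
--     target_count: int,
--     max_per_pack: int,
-- ) -> list[dict]:
--     """Pick `target_count` assets via round-robin across packs.
--
--     Groups by pack_name, iterates packs in sorted order, picks one
--     asset per pack per round. Continues until target_count is reached
--     OR all packs are exhausted (or hit their max_per_pack cap).
--
--     Within each pack, assets are picked in sorted asset_id order so
--     the output is deterministic across runs.
--
--     Returns a list of selected assets, length <= target_count.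
--     """
--     if target_count <= 0 or not assets:
--         return []
--
--     by_pack: dict[str, list[dict]] = defaultdict(list)
--     for a in assets:
--         pack = a.get("pack_name") or "(no pack)"
--         by_pack[pack].append(a)
--
--     # Sort each pack's contents for determinism
--     for pack in by_pack:
--         by_pack[pack].sort(key=lambda a: a.get("asset_id", ""))
--
--     pack_names = sorted(by_pack.keys())
--     pack_taken: dict[str, int] = defaultdict(int)
--     pack_indices: dict[str, int] = defaultdict(int)
--     selected: list[dict] = []
--
--     while len(selected) < target_count:
--         progress_in_round = False
--         for pack in pack_names:
--             if len(selected) >= target_count: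
--                 break
--             if pack_taken[pack] >= max_per_pack:
--                 continue
--             idx = pack_indices[pack]
--             if idx >= len(by_pack[pack]):
--                 continue
--             selected.append(by_pack[pack][idx])
--             pack_indices[pack] += 1
--             pack_taken[pack] += 1
--             progress_in_round = True
--         if not progress_in_round:
--             # All packs exhausted or capped
--             break
--
--     return selected
-- ===== SOURCE B (Python) =====
-- def round_robin_select(assets, target_count, max_per_pack):
--     """Schedule-by-sort: instead of looping round by round, tag every asset
--     with (rank inside its pack, pack name), drop ranks beyond the cap, and
--     let ONE global sort by that composite key produce the round-robin order."""
--     if target_count <= 0 or not assets: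
--         return []
--     groups = {}
--     for a in assets:
--         groups.setdefault(a.get("pack_name") or "(no pack)", []).append(a)
--     decorated = []
--     for pack, members in groups.items():
--         ms = sorted(members, key=lambda x: x.get("asset_id", ""))
--         for rank, a in enumerate(ms):
--             if rank < max_per_pack:
--                 decorated.append((rank, pack, a))
--     decorated.sort(key=lambda t: (t[0], t[1]))
--     return [a for _, _, a in decorated[:target_count]]
-- ===== Notes on version B (the rewrite author's own statement) =====
-- stated objective: alternative
-- what changed: A's while-loop that rescans all packs each round with per-pack taken/index defaultdicts and a progress flag is replaced by schedule-by-sort: each asset is decorated with (rank inside its sorted pack, pack name), ranks at or above the cap are dropped, and one global sort by that composite key yields the round-robin order, truncated to target_count.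
import Mathlib
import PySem

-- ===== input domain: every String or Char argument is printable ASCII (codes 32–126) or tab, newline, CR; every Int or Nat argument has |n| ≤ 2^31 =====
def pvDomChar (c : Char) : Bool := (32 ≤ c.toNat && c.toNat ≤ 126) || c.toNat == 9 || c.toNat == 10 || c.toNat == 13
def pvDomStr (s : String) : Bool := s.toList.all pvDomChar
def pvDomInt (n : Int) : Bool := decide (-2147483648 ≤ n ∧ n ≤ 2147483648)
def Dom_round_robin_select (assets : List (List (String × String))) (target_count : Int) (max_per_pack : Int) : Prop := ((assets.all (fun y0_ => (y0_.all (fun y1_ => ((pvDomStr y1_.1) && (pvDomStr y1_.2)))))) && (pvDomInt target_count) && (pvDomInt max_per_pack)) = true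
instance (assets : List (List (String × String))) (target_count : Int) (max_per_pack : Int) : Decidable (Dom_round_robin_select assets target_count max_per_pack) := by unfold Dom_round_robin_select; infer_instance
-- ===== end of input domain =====

-- B replaces A's round-by-round while-loop (per-pack taken/index dicts, progress flag)
-- by schedule-by-sort: tag each asset with (rank inside its pack, pack name), drop ranks
-- beyond the cap, and let one global sort by that composite key produce the round-robin
-- order; objective: alternative. (A mutates no argument.)

-- ===== PORT A =====
-- a.get("pack_name") or "(no pack)"  (assoc-list dict, first match; "" is falsy)
def pvPackName (a : List (String × String)) : String :=
  match (PySem.Dict.mk a).get? "pack_name" with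
  | some s => if s = "" then "(no pack)" else s
  | none => "(no pack)"

-- a.get("asset_id", "")
def pvAssetId (a : List (String × String)) : String :=
  (PySem.Dict.mk a).getD "asset_id" ""

-- the inner `for pack in pack_names:` loop of A (with its two `continue`s and the
-- `break` on reaching target_count); reads of the defaultdicts pack_taken/pack_indices
-- are ported value-exactly as getD (Python's defaultdict read also inserts the key with
-- value 0, which no later observation of these dicts can distinguish from getD).
-- by_pack[pack][idx] is ported as pyGet? (IndexError = none is unreachable: 0 ≤ idx < len here).
def rrsRound (by_pack : PySem.Dict String (List (List (String × String))))
    (target_count max_per_pack : Int) :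
    List String → PySem.Dict String Int → PySem.Dict String Int →
    List (List (String × String)) → Bool →
    List (List (String × String)) × PySem.Dict String Int × PySem.Dict String Int × Bool
  | [], taken, idxs, sel, prog => (sel, taken, idxs, prog)
  | pack :: rest, taken, idxs, sel, prog =>
    if (sel.length : Int) ≥ target_count then (sel, taken, idxs, prog)
    else if taken.getD pack 0 ≥ max_per_pack then
      rrsRound by_pack target_count max_per_pack rest taken idxs sel prog
    else
      let idx := idxs.getD pack 0
      if idx ≥ ((by_pack.getD pack []).length : Int) then
        rrsRound by_pack target_count max_per_pack rest taken idxs sel prog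
      else
        match PySem.List.pyGet? (by_pack.getD pack []) idx with
        | some a => rrsRound by_pack target_count max_per_pack rest
            (taken.insert pack (taken.getD pack 0 + 1)) (idxs.insert pack (idx + 1))
            (sel ++ [a]) true
        | none => rrsRound by_pack target_count max_per_pack rest taken idxs sel prog

-- termination facts for the while-loop below (cited by its decreasing_by)
theorem rrsRound_sel_le (by_pack : PySem.Dict String (List (List (String × String))))
    (target_count max_per_pack : Int) :
    ∀ (names : List String) (taken idxs : PySem.Dict String Int)
      (sel : List (List (String × String))) (prog : Bool),
      sel.length ≤ (rrsRound by_pack target_count max_per_pack names taken idxs sel prog).1.length := by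
  intro names
  induction names with
  | nil => intro taken idxs sel prog; simp [rrsRound]
  | cons p rest ih =>
    intro taken idxs sel prog
    simp only [rrsRound]
    split_ifs with h1 h2 h3
    · simp
    · exact ih ..
    · exact ih ..
    · rcases hg : PySem.List.pyGet? (by_pack.getD p []) (idxs.getD p 0) with _ | a
      · simp only [hg]; exact ih ..
      · simp only [hg]
        calc sel.length ≤ (sel ++ [a]).length := by simp
          _ ≤ _ := ih ..

theorem rrsRound_prog_lt (by_pack : PySem.Dict String (List (List (String × String))))
    (target_count max_per_pack : Int) :
    ∀ (names : List String) (taken idxs : PySem.Dict String Int)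
      (sel : List (List (String × String))),
      (rrsRound by_pack target_count max_per_pack names taken idxs sel false).2.2.2 = true →
      sel.length < (rrsRound by_pack target_count max_per_pack names taken idxs sel false).1.length := by
  intro names
  induction names with
  | nil => intro taken idxs sel h; simp [rrsRound] at h
  | cons p rest ih =>
    intro taken idxs sel h
    simp only [rrsRound] at h ⊢
    split_ifs at h ⊢ with h1 h2 h3
    · exact ih _ _ _ h
    · exact ih _ _ _ h
    · rcases hg : PySem.List.pyGet? (by_pack.getD p []) (idxs.getD p 0) with _ | a
      · rw [hg] at h; exact ih _ _ _ h
      · calc sel.length < (sel ++ [a]).length := by simp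
          _ ≤ _ := rrsRound_sel_le ..

-- the `while len(selected) < target_count:` loop of A
def rrsLoop (pack_names : List String)
    (by_pack : PySem.Dict String (List (List (String × String))))
    (target_count max_per_pack : Int)
    (taken idxs : PySem.Dict String Int)
    (sel : List (List (String × String))) : List (List (String × String)) :=
  if (sel.length : Int) ≥ target_count then sel
  else
    let res := rrsRound by_pack target_count max_per_pack pack_names taken idxs sel false
    if hp : res.2.2.2 = true then
      rrsLoop pack_names by_pack target_count max_per_pack res.2.1 res.2.2.1 res.1
    else res.1
termination_by (target_count - sel.length).toNat
decreasing_by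
  have h1 := rrsRound_prog_lt by_pack target_count max_per_pack pack_names taken idxs sel hp
  omega

def round_robin_select (assets : List (List (String × String))) (target_count : Int) (max_per_pack : Int) : List (List (String × String)) :=
  if target_count ≤ 0 ∨ assets = [] then []
  else
    let by_pack0 := assets.foldl
      (fun d a => d.modify (pvPackName a) [] (fun l => l ++ [a])) PySem.Dict.empty
    -- for pack in by_pack: by_pack[pack].sort(key=…)
    let by_pack := by_pack0.keys.foldl
      (fun d p => d.modify p [] (fun l => PySem.List.sorted l pvAssetId false)) by_pack0
    let pack_names := PySem.List.sorted by_pack.keys (fun k => k) false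
    rrsLoop pack_names by_pack target_count max_per_pack PySem.Dict.empty PySem.Dict.empty []

-- ===== PORT B =====
-- groups.setdefault(k, []).append(a) is ported value-exactly as modify k [] (· ++ [a]);
-- the two nested `for`s appending to `decorated` are the flatMap/filterMap below;
-- decorated.sort(key=lambda t: (t[0], t[1])) is sorted2 (Python tuple key).
def round_robin_select_alt (assets : List (List (String × String))) (target_count : Int) (max_per_pack : Int) : List (List (String × String)) :=
  if target_count ≤ 0 ∨ assets = [] then []
  else
    let groups := assets.foldl
      (fun d a => d.modify (pvPackName a) [] (fun l => l ++ [a])) PySem.Dict.empty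
    let decorated := groups.items.flatMap (fun pm =>
      (PySem.List.enumerate (PySem.List.sorted pm.2 pvAssetId false) 0).filterMap
        (fun ra => if ra.1 < max_per_pack then some (ra.1, pm.1, ra.2) else none))
    let decSorted := PySem.List.sorted2 decorated (fun t => t.1) (fun t => t.2.1) false
    (PySem.List.slice decSorted none (some target_count)).map (fun t => t.2.2)

-- ===== PRECONDITION & SPEC =====
def Spec_round_robin_select (assets : List (List (String × String))) (target_count : Int) (max_per_pack : Int) (out : List (List (String × String))) : Prop := out = round_robin_select_alt assets target_count max_per_pack
instance (assets : List (List (String × String))) (target_count : Int) (max_per_pack : Int) (out : List (List (String × String))) : Decidable (Spec_round_robin_select assets target_count max_per_pack out) := by unfold Spec_round_robin_select; infer_instance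

-- ===== CLAIM (what is proved, stated in full; the proofs are below) =====
def Claim_equal_round_robin_select : Prop := ∀ (assets : List (List (String × String))) (target_count : Int) (max_per_pack : Int), Dom_round_robin_select assets target_count max_per_pack → Spec_round_robin_select assets target_count max_per_pack (round_robin_select assets target_count max_per_pack)

-- ===== LEMMAS AND PROOFS =====

-- abbreviations for the common grouping stage
def pvGroups (assets : List (List (String × String))) : PySem.Dict String (List (List (String × String))) :=
  assets.foldl (fun d a => d.modify (pvPackName a) [] (fun l => l ++ [a])) PySem.Dict.empty

def pvNames (assets : List (List (String × String))) : List String :=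
  PySem.List.sorted (PySem.Set.ofList (assets.map pvPackName)) (fun k => k) false

def pvPack (assets : List (List (String × String))) (p : String) : List (List (String × String)) :=
  PySem.List.sorted (assets.filter (fun a => pvPackName a == p)) pvAssetId false

def pvAvail (assets : List (List (String × String))) (mpp : Int) (p : String) : Nat :=
  min mpp.toNat (pvPack assets p).length

def pvCol (assets : List (List (String × String))) (mpp : Int) (names : List String) (r : Nat) :
    List (List (String × String)) :=
  names.filterMap (fun p => ((pvPack assets p).take (pvAvail assets mpp p))[r]?)

def pvR (assets : List (List (String × String))) (mpp : Int) : Nat :=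
  ((pvNames assets).map (pvAvail assets mpp)).foldl max 0

def pvRest (assets : List (List (String × String))) (mpp : Int) (r : Nat) :
    List (List (String × String)) :=
  (List.range (pvR assets mpp - r)).flatMap (fun j => pvCol assets mpp (pvNames assets) (r + j))

theorem pvGroups_getD (assets : List (List (String × String))) (p : String) :
    (pvGroups assets).getD p [] = assets.filter (fun a => pvPackName a == p) := by
  unfold pvGroups
  have h : assets.foldl (fun d a => d.modify (pvPackName a) [] (fun l => l ++ [a]))
        (PySem.Dict.empty (κ := String) (ν := List (List (String × String))))
      = (assets.map (fun a => (pvPackName a, a))).foldl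
        (fun d q => d.modify q.1 [] (fun l => l ++ [q.2])) PySem.Dict.empty := by
    rw [List.foldl_map]
  rw [h, PySem.Dict.getD_foldl_modify_append]
  simp [List.filter_map, Function.comp_def]

theorem pvGroups_keys (assets : List (List (String × String))) :
    (pvGroups assets).keys = PySem.Set.ofList (assets.map pvPackName) := by
  unfold pvGroups
  rw [PySem.Dict.keys_foldl_modify_key assets pvPackName [] (fun _ a => fun l => l ++ [a])]
  simp [PySem.Set.update_nil_left]

theorem pvGroups_keys_nodup (assets : List (List (String × String))) :
    (pvGroups assets).keys.Nodup := by
  rw [pvGroups_keys]; exact PySem.Set.nodup_ofList _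

theorem pvNames_pairwise_lt (assets : List (List (String × String))) :
    (pvNames assets).Pairwise (· < ·) :=
  PySem.List.sorted_ofList_pairwise_lt (assets.map pvPackName)

theorem pvNames_nodup (assets : List (List (String × String))) : (pvNames assets).Nodup :=
  (pvNames_pairwise_lt assets).imp ne_of_lt

-- fold of modify over a key list: keys not in the list are untouched
theorem foldl_modify_getD_not_mem {ν : Type} (f : ν → ν) (d0 : ν) :
    ∀ (ks : List String) (d : PySem.Dict String ν) (p : String), p ∉ ks →
      (ks.foldl (fun d k => d.modify k d0 f) d).getD p d0 = d.getD p d0 := by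
  intro ks
  induction ks with
  | nil => intro d p _; rfl
  | cons k rest ih =>
    intro d p hp
    simp only [List.foldl_cons]
    rw [ih _ _ (by simp at hp; exact hp.2)]
    rw [PySem.Dict.getD_modify]
    simp at hp
    rw [if_neg hp.1]

-- each key in the (nodup) list gets f applied exactly once
theorem foldl_modify_getD_mem {ν : Type} (f : ν → ν) (d0 : ν) :
    ∀ (ks : List String) (d : PySem.Dict String ν) (p : String), ks.Nodup → p ∈ ks →
      (ks.foldl (fun d k => d.modify k d0 f) d).getD p d0 = f (d.getD p d0) := by
  intro ks
  induction ks with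
  | nil => intro d p _ h; simp at h
  | cons k rest ih =>
    intro d p hnd hp
    simp only [List.foldl_cons]
    rcases List.mem_cons.mp hp with rfl | hmem
    · rw [foldl_modify_getD_not_mem f d0 rest _ p (by simp at hnd; exact hnd.1)]
      rw [PySem.Dict.getD_modify, if_pos rfl]
    · rw [ih _ _ (by simp at hnd; exact hnd.2) hmem]
      rw [PySem.Dict.getD_modify]
      have : p ≠ k := by rintro rfl; simp at hnd; exact hnd.1 hmem
      rw [if_neg this]

-- rrsRound never touches dict entries outside the name list it processes
theorem rrsRound_getD_frozen (bp : PySem.Dict String (List (List (String × String))))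
    (target mpp : Int) :
    ∀ (names : List String) (taken idxs : PySem.Dict String Int)
      (sel : List (List (String × String))) (prog : Bool) (q : String), q ∉ names →
      (rrsRound bp target mpp names taken idxs sel prog).2.1.getD q 0 = taken.getD q 0 ∧
      (rrsRound bp target mpp names taken idxs sel prog).2.2.1.getD q 0 = idxs.getD q 0 := by
  intro names
  induction names with
  | nil => intro taken idxs sel prog q _; exact ⟨rfl, rfl⟩
  | cons p rest ih =>
    intro taken idxs sel prog q hq
    have hqp : q ≠ p := by simp at hq; exact hq.1
    have hqr : q ∉ rest := by simp at hq; exact hq.2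
    simp only [rrsRound]
    split_ifs with h1 h2 h3
    · exact ⟨rfl, rfl⟩
    · exact ih _ _ _ _ _ hqr
    · exact ih _ _ _ _ _ hqr
    · rcases hg : PySem.List.pyGet? (bp.getD p []) (idxs.getD p 0) with _ | a
      · exact ih _ _ _ _ _ hqr
      · have := ih (taken.insert p (taken.getD p 0 + 1)) (idxs.insert p (idxs.getD p 0 + 1))
          (sel ++ [a]) true q hqr
        rw [PySem.Dict.getD_insert, if_neg hqp] at this
        rw [PySem.Dict.getD_insert, if_neg hqp] at this
        exact this

-- one round of A, characterized: it appends column r (truncated to the remaining room),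
-- reports progress accordingly, and if it ran through the whole column it advances every
-- per-pack counter to min (r+1) avail
theorem rrsRound_spec (assets : List (List (String × String))) (target mpp : Int)
    (bp : PySem.Dict String (List (List (String × String)))) (r : Nat) :
    ∀ (names : List String), names.Nodup →
    (∀ p ∈ names, bp.getD p [] = pvPack assets p) →
    ∀ (taken idxs : PySem.Dict String Int) (sel : List (List (String × String))) (prog : Bool),
    (∀ p ∈ names, taken.getD p 0 = ((min r (pvAvail assets mpp p) : Nat) : Int)) →
    (∀ p ∈ names, idxs.getD p 0 = ((min r (pvAvail assets mpp p) : Nat) : Int)) →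
    (rrsRound bp target mpp names taken idxs sel prog).1
      = sel ++ (pvCol assets mpp names r).take (target - sel.length).toNat
    ∧ (rrsRound bp target mpp names taken idxs sel prog).2.2.2
      = (prog || decide ((target - sel.length).toNat ≠ 0 ∧ pvCol assets mpp names r ≠ []))
    ∧ ((pvCol assets mpp names r).length < (target - sel.length).toNat →
        (∀ p ∈ names, (rrsRound bp target mpp names taken idxs sel prog).2.1.getD p 0
            = ((min (r+1) (pvAvail assets mpp p) : Nat) : Int))
        ∧ (∀ p ∈ names, (rrsRound bp target mpp names taken idxs sel prog).2.2.1.getD p 0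
            = ((min (r+1) (pvAvail assets mpp p) : Nat) : Int))) := by
  intro names
  induction names with
  | nil =>
    intro _ _ taken idxs sel prog _ _
    refine ⟨by simp [rrsRound, pvCol], by simp [rrsRound, pvCol], ?_⟩
    intro _; exact ⟨by simp, by simp⟩
  | cons p rest ih =>
    intro hnd hbp taken idxs sel prog hT hI
    have hndr : rest.Nodup := (List.nodup_cons.mp hnd).2
    have hpr : p ∉ rest := (List.nodup_cons.mp hnd).1
    have hbpr : ∀ q ∈ rest, bp.getD q [] = pvPack assets q := fun q hq => hbp q (by simp [hq])
    have hTp := hT p (by simp)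
    have hIp := hI p (by simp)
    have hTr : ∀ q ∈ rest, taken.getD q 0 = ((min r (pvAvail assets mpp q) : Nat) : Int) :=
      fun q hq => hT q (by simp [hq])
    have hIr : ∀ q ∈ rest, idxs.getD q 0 = ((min r (pvAvail assets mpp q) : Nat) : Int) :=
      fun q hq => hI q (by simp [hq])
    have hAcap : pvAvail assets mpp p ≤ mpp.toNat := Nat.min_le_left _ _
    have hAlen : pvAvail assets mpp p ≤ (pvPack assets p).length := Nat.min_le_right _ _
    simp only [rrsRound]
    by_cases h1 : (sel.length : Int) ≥ target
    · rw [if_pos h1]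
      have hroom : (target - (sel.length : Int)).toNat = 0 := by omega
      refine ⟨by simp [hroom], by simp [hroom], ?_⟩
      intro hlt; rw [hroom] at hlt; omega
    rw [if_neg h1]
    have hroom : (target - (sel.length : Int)).toNat ≠ 0 := by omega
    by_cases h2 : taken.getD p 0 ≥ mpp
    · -- pack capped: contributes nothing now or ever again
      rw [if_pos h2]
      rw [hTp] at h2
      have hskip : pvAvail assets mpp p ≤ r ∧
          min (r+1) (pvAvail assets mpp p) = min r (pvAvail assets mpp p) := by omega
      have hnone : ((pvPack assets p).take (pvAvail assets mpp p))[r]? = none := by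
        apply List.getElem?_eq_none; simp; omega
      have hcol : pvCol assets mpp (p :: rest) r = pvCol assets mpp rest r := by
        simp [pvCol, List.filterMap_cons, hnone]
      obtain ⟨g1, g2, g3⟩ := ih hndr hbpr taken idxs sel prog hTr hIr
      refine ⟨by rw [g1, hcol], by rw [g2, hcol], ?_⟩
      rw [hcol]
      intro hlt
      obtain ⟨g3a, g3b⟩ := g3 hlt
      refine ⟨?_, ?_⟩ <;> intro q hq <;> rcases List.mem_cons.mp hq with rfl | hqr
      · rw [(rrsRound_getD_frozen bp target mpp rest taken idxs sel prog q hpr).1, hTp,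
          hskip.2]
      · exact g3a q hqr
      · rw [(rrsRound_getD_frozen bp target mpp rest taken idxs sel prog q hpr).2, hIp,
          hskip.2]
      · exact g3b q hqr
    rw [if_neg h2]
    rw [hTp] at h2
    by_cases h3 : idxs.getD p 0 ≥ ((bp.getD p []).length : Int)
    · -- pack exhausted
      rw [if_pos h3]
      rw [hIp, hbp p (by simp)] at h3
      have hskip : pvAvail assets mpp p ≤ r ∧
          min (r+1) (pvAvail assets mpp p) = min r (pvAvail assets mpp p) := by omega
      have hnone : ((pvPack assets p).take (pvAvail assets mpp p))[r]? = none := by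
        apply List.getElem?_eq_none; simp; omega
      have hcol : pvCol assets mpp (p :: rest) r = pvCol assets mpp rest r := by
        simp [pvCol, List.filterMap_cons, hnone]
      obtain ⟨g1, g2, g3⟩ := ih hndr hbpr taken idxs sel prog hTr hIr
      refine ⟨by rw [g1, hcol], by rw [g2, hcol], ?_⟩
      rw [hcol]
      intro hlt
      obtain ⟨g3a, g3b⟩ := g3 hlt
      refine ⟨?_, ?_⟩ <;> intro q hq <;> rcases List.mem_cons.mp hq with rfl | hqr
      · rw [(rrsRound_getD_frozen bp target mpp rest taken idxs sel prog q hpr).1, hTp,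
          hskip.2]
      · exact g3a q hqr
      · rw [(rrsRound_getD_frozen bp target mpp rest taken idxs sel prog q hpr).2, hIp,
          hskip.2]
      · exact g3b q hqr
    · -- pack contributes its r-th asset
      rw [if_neg h3]
      rw [hIp, hbp p (by simp)] at h3
      have hrA : r < pvAvail assets mpp p := by
        unfold pvAvail at *; omega
      have hminr : min r (pvAvail assets mpp p) = r := by omega
      have hrlen : r < (pvPack assets p).length := by omega
      have hget : PySem.List.pyGet? (bp.getD p []) (idxs.getD p 0)
          = some ((pvPack assets p)[r]) := by
        rw [hbp p (by simp), hIp, hminr, PySem.List.pyGet?_natCast,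
          List.getElem?_eq_getElem hrlen]
      rw [hget]
      have hsome : ((pvPack assets p).take (pvAvail assets mpp p))[r]?
          = some ((pvPack assets p)[r]) := by
        rw [List.getElem?_take, if_pos hrA, List.getElem?_eq_getElem hrlen]
      have hcol : pvCol assets mpp (p :: rest) r
          = (pvPack assets p)[r] :: pvCol assets mpp rest r := by
        simp [pvCol, List.filterMap_cons, hsome]
      -- new dict invariants for the recursive call
      set taken' := taken.insert p (taken.getD p 0 + 1) with htaken'
      set idxs' := idxs.insert p (idxs.getD p 0 + 1) with hidxs'
      have hTr' : ∀ q ∈ rest, taken'.getD q 0 = ((min r (pvAvail assets mpp q) : Nat) : Int) := by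
        intro q hq
        rw [htaken', PySem.Dict.getD_insert, if_neg (by rintro rfl; exact hpr hq)]
        exact hTr q hq
      have hIr' : ∀ q ∈ rest, idxs'.getD q 0 = ((min r (pvAvail assets mpp q) : Nat) : Int) := by
        intro q hq
        rw [hidxs', PySem.Dict.getD_insert, if_neg (by rintro rfl; exact hpr hq)]
        exact hIr q hq
      obtain ⟨g1, g2, g3⟩ := ih hndr hbpr taken' idxs' (sel ++ [(pvPack assets p)[r]]) true hTr' hIr'
      obtain ⟨k, hk⟩ : ∃ k, (target - (sel.length : Int)).toNat = k + 1 :=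
        ⟨(target - (sel.length : Int)).toNat - 1, by omega⟩
      have hroom' : (target - ((sel ++ [(pvPack assets p)[r]]).length : Int)).toNat = k := by
        simp; omega
      refine ⟨?_, ?_, ?_⟩
      · rw [g1, hcol, hk, hroom', List.take_succ_cons]
        simp
      · rw [g2, hcol]
        simp [hk]
      · rw [hcol]
        intro hlt
        have hlt' : (pvCol assets mpp rest r).length
            < (target - ((sel ++ [(pvPack assets p)[r]]).length : Int)).toNat := by
          rw [hroom']; simp at hlt; omega
        obtain ⟨g3a, g3b⟩ := g3 hlt'
        refine ⟨?_, ?_⟩ <;> intro q hq <;> rcases List.mem_cons.mp hq with rfl | hqr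
        · rw [(rrsRound_getD_frozen bp target mpp rest taken' idxs'
            (sel ++ [(pvPack assets q)[r]]) true q hpr).1, htaken',
            PySem.Dict.getD_insert, if_pos rfl, hTp]
          have : min (r+1) (pvAvail assets mpp q) = r + 1 := by omega
          rw [this, hminr]; push_cast; ring
        · exact g3a q hqr
        · rw [(rrsRound_getD_frozen bp target mpp rest taken' idxs'
            (sel ++ [(pvPack assets q)[r]]) true q hpr).2, hidxs',
            PySem.Dict.getD_insert, if_pos rfl, hIp]
          have : min (r+1) (pvAvail assets mpp q) = r + 1 := by omega
          rw [this, hminr]; push_cast; ring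
        · exact g3b q hqr

theorem pvAvail_le_pvR (assets : List (List (String × String))) (mpp : Int)
    (p : String) (hp : p ∈ pvNames assets) : pvAvail assets mpp p ≤ pvR assets mpp :=
  (PySem.List.le_foldl_max ((pvNames assets).map (pvAvail assets mpp)) 0).2 _
    (List.mem_map_of_mem hp)

theorem pvCol_eq_nil (assets : List (List (String × String))) (mpp : Int) (r : Nat)
    (hr : pvR assets mpp ≤ r) : pvCol assets mpp (pvNames assets) r = [] := by
  rw [pvCol, List.filterMap_eq_nil_iff]
  intro p hp
  apply List.getElem?_eq_none
  simp
  exact Or.inl (le_trans (pvAvail_le_pvR assets mpp p hp) hr)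

theorem pvCol_ne_nil (assets : List (List (String × String))) (mpp : Int) (r : Nat)
    (hr : r < pvR assets mpp) : pvCol assets mpp (pvNames assets) r ≠ [] := by
  unfold pvR at hr
  rcases PySem.List.foldl_max_mem ((pvNames assets).map (pvAvail assets mpp)) 0 with h | h
  · exfalso; omega
  · obtain ⟨p, hp, hap⟩ := List.mem_map.mp h
    intro hnil
    rw [pvCol, List.filterMap_eq_nil_iff] at hnil
    have := hnil p hp
    rw [List.getElem?_take, if_pos (by rw [hap]; exact hr)] at this
    rw [List.getElem?_eq_none_iff] at this
    have hA : pvAvail assets mpp p ≤ (pvPack assets p).length := Nat.min_le_right _ _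
    rw [hap] at hA
    omega

theorem pvRest_eq_nil (assets : List (List (String × String))) (mpp : Int) (r : Nat)
    (hr : pvR assets mpp ≤ r) : pvRest assets mpp r = [] := by
  rw [pvRest, Nat.sub_eq_zero_of_le hr]; rfl

theorem pvRest_succ (assets : List (List (String × String))) (mpp : Int) (r : Nat)
    (hr : r < pvR assets mpp) :
    pvRest assets mpp r = pvCol assets mpp (pvNames assets) r ++ pvRest assets mpp (r+1) := by
  rw [pvRest, pvRest]
  have h : pvR assets mpp - r = (pvR assets mpp - (r+1)) + 1 := by omega
  rw [h, List.range_succ_eq_map]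
  simp only [List.flatMap_cons, Nat.add_zero, List.map, List.flatMap_map]
  congr 1
  apply List.flatMap_congr
  intro j _
  congr 1
  omega

-- the while-loop of A, characterized: from round r with consistent counters it appends
-- the remaining column sequence, truncated to the remaining room
theorem rrsLoop_spec (assets : List (List (String × String))) (target mpp : Int)
    (bp : PySem.Dict String (List (List (String × String))))
    (hbp : ∀ p ∈ pvNames assets, bp.getD p [] = pvPack assets p) :
    ∀ (n r : Nat), pvR assets mpp ≤ r + n →
    ∀ (taken idxs : PySem.Dict String Int) (sel : List (List (String × String))),
    (∀ p ∈ pvNames assets, taken.getD p 0 = ((min r (pvAvail assets mpp p) : Nat) : Int)) →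
    (∀ p ∈ pvNames assets, idxs.getD p 0 = ((min r (pvAvail assets mpp p) : Nat) : Int)) →
    rrsLoop (pvNames assets) bp target mpp taken idxs sel
      = sel ++ (pvRest assets mpp r).take (target - sel.length).toNat := by
  intro n
  induction n with
  | zero =>
    intro r hn taken idxs sel hT hI
    rw [rrsLoop]
    by_cases hsel : (sel.length : Int) ≥ target
    · rw [if_pos hsel]
      have : (target - (sel.length : Int)).toNat = 0 := by omega
      simp [this]
    · rw [if_neg hsel]
      obtain ⟨g1, g2, _⟩ := rrsRound_spec assets target mpp bp r (pvNames assets)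
        (pvNames_nodup assets) hbp taken idxs sel false hT hI
      rw [pvCol_eq_nil assets mpp r (by omega)] at g1 g2
      simp only [List.take_nil, List.append_nil] at g1
      simp at g2
      simp only [g2, dif_neg Bool.false_ne_true, g1]
      rw [pvRest_eq_nil assets mpp r (by omega)]
      simp
  | succ m ih =>
    intro r hn taken idxs sel hT hI
    rw [rrsLoop]
    by_cases hsel : (sel.length : Int) ≥ target
    · rw [if_pos hsel]
      have : (target - (sel.length : Int)).toNat = 0 := by omega
      simp [this]
    rw [if_neg hsel]
    obtain ⟨g1, g2, g3⟩ := rrsRound_spec assets target mpp bp r (pvNames assets)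
      (pvNames_nodup assets) hbp taken idxs sel false hT hI
    by_cases hR : pvR assets mpp ≤ r
    · rw [pvCol_eq_nil assets mpp r hR] at g1 g2
      simp only [List.take_nil, List.append_nil] at g1
      simp at g2
      simp only [g2, dif_neg Bool.false_ne_true, g1]
      rw [pvRest_eq_nil assets mpp r hR]
      simp
    · have hrlt : r < pvR assets mpp := by omega
      have hcne := pvCol_ne_nil assets mpp r hrlt
      have hroom : (target - (sel.length : Int)).toNat ≠ 0 := by omega
      have g2' : (rrsRound bp target mpp (pvNames assets) taken idxs sel false).2.2.2 = true := by
        have hconj : ((target - (sel.length : Int)).toNat ≠ 0 ∧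
            pvCol assets mpp (pvNames assets) r ≠ []) := ⟨hroom, hcne⟩
        rw [g2]; simpa using hconj
      rw [dif_pos g2']
      set col := pvCol assets mpp (pvNames assets) r with hcol
      set room := (target - (sel.length : Int)).toNat with hroomdef
      by_cases hfit : col.length < room
      · have htake : col.take room = col := List.take_of_length_le (by omega)
        obtain ⟨g3a, g3b⟩ := g3 hfit
        have := ih (r+1) (by omega)
          (rrsRound bp target mpp (pvNames assets) taken idxs sel false).2.1
          (rrsRound bp target mpp (pvNames assets) taken idxs sel false).2.2.1
          (rrsRound bp target mpp (pvNames assets) taken idxs sel false).1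
          g3a g3b
        rw [this, g1, htake, pvRest_succ assets mpp r hrlt, List.take_append, htake]
        have h1 : ((sel ++ col).length : Int) = (sel.length : Int) + col.length := by
          simp
        have h2 : (target - ((sel ++ col).length : Int)).toNat = room - col.length := by
          rw [h1]; omega
        rw [h2, List.append_assoc]
      · -- the round reached target_count: the next loop test stops immediately
        have hlen1 : ((rrsRound bp target mpp (pvNames assets) taken idxs sel false).1.length : Int)
            ≥ target := by
          rw [g1]; simp [List.length_take]; omega
        rw [rrsLoop, if_pos hlen1, g1]
        rw [pvRest_succ assets mpp r hrlt, List.take_append]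
        have : room - col.length = 0 := by omega
        rw [← hcol, this]
        simp

-- ---------- B-side lemmas: the decorated-and-sorted list IS the column sequence ----------

-- the composite sort key (rank, pack) with Python's lexicographic tuple order
def pvKey (t : Int × String × List (String × String)) : Lex (Int × String) := toLex (t.1, t.2.1)

-- column r of the schedule, as (rank, pack, asset) triples
def pvColT (assets : List (List (String × String))) (mpp : Int) (r : Nat) :
    List (Int × String × List (String × String)) :=
  (pvNames assets).filterMap (fun p =>
    (((pvPack assets p).take (pvAvail assets mpp p))[r]?).map (fun a => ((r : Int), p, a)))

def pvRestT (assets : List (List (String × String))) (mpp : Int) :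
    List (Int × String × List (String × String)) :=
  (List.range (pvR assets mpp)).flatMap (pvColT assets mpp)

-- B's per-pack chunk of decorated triples
def pvChunk (assets : List (List (String × String))) (mpp : Int) (p : String) :
    List (Int × String × List (String × String)) :=
  (PySem.List.enumerate (pvPack assets p) 0).filterMap
    (fun ra => if ra.1 < mpp then some (ra.1, p, ra.2) else none)

-- the canonical description of a scheduled triple
def pvTri (assets : List (List (String × String))) (mpp : Int)
    (t : Int × String × List (String × String)) : Prop :=
  ∃ p ∈ pvNames assets, ∃ k : Nat, ∃ a,
    k < pvAvail assets mpp p ∧ (pvPack assets p)[k]? = some a ∧ t = ((k : Int), p, a)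

theorem sorted2_eq_sorted_key (xs : List (Int × String × List (String × String))) :
    PySem.List.sorted2 xs (fun t => t.1) (fun t => t.2.1) false
      = PySem.List.sorted xs pvKey false := by
  unfold PySem.List.sorted2 PySem.List.sorted
  dsimp only
  simp only [Bool.false_eq_true, if_false]
  congr 1
  funext acc x
  congr 1
  funext a b
  rw [Bool.eq_iff_iff]
  simp only [Bool.or_eq_true, Bool.and_eq_true, Bool.not_eq_true', decide_eq_true_eq,
    decide_eq_false_iff_not, pvKey, Prod.Lex.toLex_lt_toLex]
  by_cases h : a.1 < b.1
  · simp [h]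
  · simp only [h, false_or]
    constructor
    · rintro ⟨h1, h2⟩; exact ⟨le_antisymm (not_lt.mp h1) (not_lt.mp h), h2⟩
    · rintro ⟨h1, h2⟩; exact ⟨by simp [h1], h2⟩

theorem pvColT_map (assets : List (List (String × String))) (mpp : Int) (r : Nat) :
    (pvColT assets mpp r).map (fun t => t.2.2) = pvCol assets mpp (pvNames assets) r := by
  unfold pvColT pvCol
  rw [List.map_filterMap]
  apply List.filterMap_congr
  intro p _
  simp [Option.map_map, Function.comp_def]

theorem pvRestT_map (assets : List (List (String × String))) (mpp : Int) :
    (pvRestT assets mpp).map (fun t => t.2.2) = pvRest assets mpp 0 := by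
  unfold pvRestT pvRest
  rw [List.map_flatMap]
  simp only [Nat.sub_zero, Nat.zero_add]
  apply List.flatMap_congr
  intro r _
  exact pvColT_map assets mpp r

theorem fst_mem_pvColT (assets : List (List (String × String))) (mpp : Int) (r : Nat)
    (t : Int × String × List (String × String)) (ht : t ∈ pvColT assets mpp r) :
    t.1 = (r : Int) := by
  rw [pvColT, List.mem_filterMap] at ht
  obtain ⟨p, _, hf⟩ := ht
  rw [Option.map_eq_some_iff] at hf
  obtain ⟨a, _, rfl⟩ := hf
  rfl

theorem snd_mem_pvChunk (assets : List (List (String × String))) (mpp : Int) (p : String)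
    (t : Int × String × List (String × String)) (ht : t ∈ pvChunk assets mpp p) :
    t.2.1 = p := by
  rw [pvChunk, List.mem_filterMap] at ht
  obtain ⟨ra, _, hf⟩ := ht
  split_ifs at hf
  exact (Option.some.inj hf) ▸ rfl

theorem mem_pvRestT (assets : List (List (String × String))) (mpp : Int)
    (t : Int × String × List (String × String)) :
    t ∈ pvRestT assets mpp ↔ pvTri assets mpp t := by
  rw [pvRestT, List.mem_flatMap]
  constructor
  · rintro ⟨r, _, ht⟩
    rw [pvColT, List.mem_filterMap] at ht
    obtain ⟨p, hp, hf⟩ := ht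
    rw [Option.map_eq_some_iff] at hf
    obtain ⟨a, hga, rfl⟩ := hf
    rw [List.getElem?_take] at hga
    split_ifs at hga with hra
    exact ⟨p, hp, r, a, hra, hga, rfl⟩
  · rintro ⟨p, hp, k, a, hk, hget, rfl⟩
    refine ⟨k, List.mem_range.mpr (lt_of_lt_of_le hk (pvAvail_le_pvR assets mpp p hp)), ?_⟩
    rw [pvColT, List.mem_filterMap]
    exact ⟨p, hp, by rw [List.getElem?_take, if_pos hk, hget]; rfl⟩

theorem mem_flat_pvChunk (assets : List (List (String × String))) (mpp : Int)
    (t : Int × String × List (String × String)) :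
    t ∈ (pvNames assets).flatMap (pvChunk assets mpp) ↔ pvTri assets mpp t := by
  rw [List.mem_flatMap]
  constructor
  · rintro ⟨p, hp, ht⟩
    rw [pvChunk, List.mem_filterMap] at ht
    obtain ⟨ra, hra, hf⟩ := ht
    split_ifs at hf with hlt
    rw [PySem.List.mem_enumerate_iff] at hra
    obtain ⟨k, hk, rfl⟩ := hra
    simp only [Int.zero_add] at hlt hf ⊢
    refine ⟨p, hp, k, (pvPack assets p)[k], ?_, List.getElem?_eq_getElem hk, ?_⟩
    · unfold pvAvail; omega
    · exact (Option.some.inj hf).symm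
  · rintro ⟨p, hp, k, a, hk, hget, rfl⟩
    obtain ⟨hklen, hka⟩ := List.getElem?_eq_some_iff.mp hget
    have hcap : pvAvail assets mpp p ≤ mpp.toNat := Nat.min_le_left _ _
    refine ⟨p, hp, ?_⟩
    rw [pvChunk, List.mem_filterMap]
    refine ⟨((0 : Int) + (k : Int), (pvPack assets p)[k]),
      (PySem.List.mem_enumerate_iff _ _ _).mpr ⟨k, hklen, rfl⟩, ?_⟩
    rw [if_pos (by omega)]
    simp [hka]

theorem pairwise_pvRestT (assets : List (List (String × String))) (mpp : Int) :
    (pvRestT assets mpp).Pairwise (fun a b => pvKey a < pvKey b) := by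
  rw [pvRestT, List.pairwise_flatMap]
  refine ⟨?_, ?_⟩
  · intro r _
    rw [pvColT]
    refine List.Pairwise.filterMap _ ?_ (pvNames_pairwise_lt assets)
    intro p p' hpp b hb b' hb'
    rw [Option.map_eq_some_iff] at hb hb'
    obtain ⟨a, _, rfl⟩ := hb
    obtain ⟨a', _, rfl⟩ := hb'
    rw [pvKey, pvKey, Prod.Lex.toLex_lt_toLex]
    right
    exact ⟨rfl, hpp⟩
  · refine List.Pairwise.imp ?_ List.pairwise_lt_range
    intro r1 r2 h x hx y hy
    rw [pvKey, pvKey, Prod.Lex.toLex_lt_toLex]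
    left
    rw [fst_mem_pvColT assets mpp r1 x hx, fst_mem_pvColT assets mpp r2 y hy]
    exact_mod_cast h

theorem nodup_pvRestT (assets : List (List (String × String))) (mpp : Int) :
    (pvRestT assets mpp).Nodup :=
  (pairwise_pvRestT assets mpp).imp (fun h => by rintro rfl; exact lt_irrefl _ h)

theorem nodup_flat_pvChunk (assets : List (List (String × String))) (mpp : Int) :
    ((pvNames assets).flatMap (pvChunk assets mpp)).Nodup := by
  rw [List.flatMap_def, List.nodup_flatten]
  constructor
  · intro l hl
    rw [List.mem_map] at hl
    obtain ⟨p, _, rfl⟩ := hl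
    have hpw : (pvChunk assets mpp p).Pairwise (fun a b => a.1 < b.1) := by
      rw [pvChunk]
      refine List.Pairwise.filterMap _ ?_ (PySem.List.pairwise_lt_enumerate _ 0)
      intro ra ra' h b hb b' hb'
      split_ifs at hb hb'
      rw [← Option.some.inj hb, ← Option.some.inj hb']
      exact h
    exact hpw.imp (fun h => by rintro rfl; exact lt_irrefl _ h)
  · rw [List.pairwise_map]
    refine List.Pairwise.imp ?_ (pvNames_pairwise_lt assets)
    intro p p' hpp x hx hx'
    have h1 := snd_mem_pvChunk assets mpp p x hx
    have h2 := snd_mem_pvChunk assets mpp p' x hx'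
    exact absurd (h1 ▸ h2) (ne_of_lt hpp)

theorem flat_pvChunk_perm_pvRestT (assets : List (List (String × String))) (mpp : Int) :
    ((pvNames assets).flatMap (pvChunk assets mpp)).Perm (pvRestT assets mpp) :=
  (List.perm_ext_iff_of_nodup (nodup_flat_pvChunk assets mpp) (nodup_pvRestT assets mpp)).mpr
    (fun t => by rw [mem_flat_pvChunk, mem_pvRestT])

-- ===== VERDICT (by name: the statement is the Claim_ definition above) =====
theorem round_robin_select_spec : Claim_equal_round_robin_select := by
  intro assets target mpp _
  unfold Spec_round_robin_select
  by_cases h0 : target ≤ 0 ∨ assets = []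
  · rw [round_robin_select, round_robin_select_alt, if_pos h0, if_pos h0]
  · push_neg at h0
    obtain ⟨ht0, hane⟩ := h0
    have ht : 0 < target := by omega
    have h0' : ¬ (target ≤ 0 ∨ assets = []) := by
      push_neg
      exact ⟨ht0, hane⟩
    rw [round_robin_select, round_robin_select_alt, if_neg h0', if_neg h0']
    -- identify the grouping dict on both sides
    have hgr : assets.foldl (fun d a => d.modify (pvPackName a) [] (fun l => l ++ [a]))
        PySem.Dict.empty = pvGroups assets := rfl
    rw [hgr]
    have hkeys0 : (pvGroups assets).keys = PySem.Set.ofList (assets.map pvPackName) :=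
      pvGroups_keys assets
    -- ---- the A side ----
    set bpA := (pvGroups assets).keys.foldl
      (fun d p => d.modify p [] (fun l => PySem.List.sorted l pvAssetId false))
      (pvGroups assets) with hbpAdef
    have hbpAkeys : bpA.keys = (pvGroups assets).keys := by
      rw [hbpAdef, PySem.Dict.keys_foldl_modify, PySem.Set.update_eq_append_filter]
      have hnil : List.filter (fun y => !PySem.Set.contains (pvGroups assets).keys y)
          (PySem.Set.ofList (pvGroups assets).keys) = [] := by
        rw [List.filter_eq_nil_iff]
        intro y hy
        have hmem : y ∈ (pvGroups assets).keys := (PySem.Set.mem_ofList _ _).mp hy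
        have hc : PySem.Set.contains (pvGroups assets).keys y = true :=
          (PySem.Set.contains_iff _ _).mpr hmem
        simpa using hmem
      rw [hnil, List.append_nil]
    have hpn : PySem.List.sorted bpA.keys (fun k => k) false = pvNames assets := by
      rw [hbpAkeys, hkeys0]; rfl
    have hbpA : ∀ p ∈ pvNames assets, bpA.getD p [] = pvPack assets p := by
      intro p hp
      have hpmem : p ∈ (pvGroups assets).keys := by
        rw [hkeys0]
        exact (PySem.List.mem_sorted _ _ _ _).mp hp
      rw [hbpAdef, foldl_modify_getD_mem _ _ _ _ _ (pvGroups_keys_nodup assets) hpmem,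
        pvGroups_getD]
      rfl
    have hA : rrsLoop (PySem.List.sorted bpA.keys (fun k => k) false) bpA target mpp
        PySem.Dict.empty PySem.Dict.empty []
        = (pvRest assets mpp 0).take target.toNat := by
      rw [hpn]
      have hinv : ∀ p ∈ pvNames assets,
          (PySem.Dict.empty (κ := String) (ν := Int)).getD p 0
            = ((min 0 (pvAvail assets mpp p) : Nat) : Int) := by
        intro p _; simp [PySem.Dict.getD_empty]
      have := rrsLoop_spec assets target mpp bpA hbpA (pvR assets mpp) 0 (by omega)
        PySem.Dict.empty PySem.Dict.empty [] hinv hinv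
      simpa using this
    rw [hA]
    -- ---- the B side ----
    dsimp only
    -- the decorated list is the flatMap of per-pack chunks over the dict keys
    have hitems : (pvGroups assets).items
        = (pvGroups assets).keys.map (fun k => (k, (pvGroups assets).getD k [])) :=
      PySem.Dict.items_eq_map_keys (pvGroups assets) (pvGroups_keys_nodup assets) []
    have hdec : (pvGroups assets).items.flatMap (fun pm =>
          (PySem.List.enumerate (PySem.List.sorted pm.2 pvAssetId false) 0).filterMap
            (fun ra => if ra.1 < mpp then some (ra.1, pm.1, ra.2) else none))
        = (pvGroups assets).keys.flatMap (pvChunk assets mpp) := by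
      rw [hitems, List.flatMap_map]
      apply List.flatMap_congr
      intro p _
      rw [pvChunk, pvGroups_getD]
      rfl
    rw [hdec]
    -- the keys are a permutation of the sorted names, so the whole decorated list
    -- permutes the column-ordered triple sequence
    have hkperm : (pvGroups assets).keys.Perm (pvNames assets) := by
      rw [hkeys0]
      exact (PySem.List.sorted_perm _ _ _).symm
    have hperm : ((pvGroups assets).keys.flatMap (pvChunk assets mpp)).Perm
        (pvRestT assets mpp) :=
      (hkperm.flatMap (fun _ _ => List.Perm.refl _)).trans (flat_pvChunk_perm_pvRestT assets mpp)
    rw [sorted2_eq_sorted_key,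
      PySem.List.sorted_eq_of_perm_of_pairwise_lt _ (pvRestT assets mpp) pvKey hperm.symm
        (pairwise_pvRestT assets mpp),
      PySem.List.slice_to _ (le_of_lt ht), List.map_take, pvRestT_map]
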